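-- pv_equiv track=rewrite | github.com/satyaki-das-usc/svdt_eval | src/data_transfer/clean_utils.py | get_delabeled_processed_func
-- ===== SOURCE A (Python) =====
-- from typing import List
--
-- replacement_dict = {
--     "good": {
--         "good": "unk",
--         "Good": "Unk"
--     },
--     "bad": {
--         "bad": "unk",
--         "Bad": "Unk"
--     }
-- }
--
-- reverse_replacement_dict = {
--     "good": {
--         "good": "unk2",
--         "Good": "Unk2"
--     },
--     "bad": {
--         "bad": "unk2",
--         "Bad": "Unk2"
--     }
-- }
--
-- def get_delabeled_processed_func(gadget: List[str], label_text):
--     rev_label_text = "bad" if label_text == "good" else "good"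
--
--     delabeled_gadget = [] + gadget
--     for key, value in replacement_dict[label_text].items():
--         for i in range(len(delabeled_gadget)):
--             delabeled_gadget[i] = delabeled_gadget[i].replace(key, value)
--     for key, value in reverse_replacement_dict[rev_label_text].items():
--         for i in range(len(delabeled_gadget)):
--             delabeled_gadget[i] = delabeled_gadget[i].replace(key, value)
--
--     return "".join(delabeled_gadget)
-- ===== SOURCE B (Python) =====
-- from typing import List
--
-- replacement_dict = {
--     "good": {"good": "unk", "Good": "Unk"},
--     "bad": {"bad": "unk", "Bad": "Unk"},
-- }
--
-- reverse_replacement_dict = {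
--     "good": {"good": "unk2", "Good": "Unk2"},
--     "bad": {"bad": "unk2", "Bad": "Unk2"},
-- }
--
-- def get_delabeled_processed_func(gadget: List[str], label_text):
--     rev_label_text = "bad" if label_text == "good" else "good"
--     # one combined table; a single left-to-right scan per line replaces A's four full passes
--     mapping = {**replacement_dict[label_text], **reverse_replacement_dict[rev_label_text]}
--     keys = list(mapping)
--     pieces = []
--     for line in [] + gadget:
--         i, n = 0, len(line)
--         while i < n:
--             for k in keys:
--                 if line.startswith(k, i):
--                     pieces.append(mapping[k])
--                     i += len(k)
--                     break
--             else:
--                 pieces.append(line[i])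
--                 i += 1
--     return "".join(pieces)
-- ===== Notes on version B (the rewrite author's own statement) =====
-- stated objective: alternative
-- what changed: Replaces A's four sequential full-string str.replace passes per line with one combined replacement table and a single left-to-right scan per line that substitutes whichever key matches at each position.
import Mathlib
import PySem

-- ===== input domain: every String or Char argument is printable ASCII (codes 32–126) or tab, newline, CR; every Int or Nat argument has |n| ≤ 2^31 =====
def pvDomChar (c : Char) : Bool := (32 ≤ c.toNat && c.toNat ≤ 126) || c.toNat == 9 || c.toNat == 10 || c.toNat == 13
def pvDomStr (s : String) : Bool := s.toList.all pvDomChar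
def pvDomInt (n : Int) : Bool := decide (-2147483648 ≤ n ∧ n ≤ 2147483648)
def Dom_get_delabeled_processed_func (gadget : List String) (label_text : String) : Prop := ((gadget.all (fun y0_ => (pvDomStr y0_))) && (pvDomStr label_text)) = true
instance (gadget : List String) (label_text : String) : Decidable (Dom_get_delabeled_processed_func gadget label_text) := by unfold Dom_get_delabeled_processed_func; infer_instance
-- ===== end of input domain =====

-- B replaces A's four sequential full-line str.replace passes with one combined table and a single
-- left-to-right scan per line (objective: alternative; same results, one pass instead of four).

-- ===== PORT A =====
def replacement_dict : PySem.Dict String (PySem.Dict String String) :=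
  PySem.Dict.ofList
    [("good", PySem.Dict.ofList [("good", "unk"), ("Good", "Unk")]),
     ("bad",  PySem.Dict.ofList [("bad", "unk"), ("Bad", "Unk")])]

def reverse_replacement_dict : PySem.Dict String (PySem.Dict String String) :=
  PySem.Dict.ofList
    [("good", PySem.Dict.ofList [("good", "unk2"), ("Good", "Unk2")]),
     ("bad",  PySem.Dict.ofList [("bad", "unk2"), ("Bad", "Unk2")])]

-- A: copy the list, run one full `str.replace` pass over every line for each table entry
-- (first the label's dict, then the reverse dict of the opposite label), then join.
-- `replacement_dict[label_text]` raises KeyError for other labels: excluded by Pre_ (getD [] is never reached inside Pre_).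
def get_delabeled_processed_func (gadget : List String) (label_text : String) : String :=
  let rev_label_text := if label_text == "good" then "bad" else "good"
  let delabeled_gadget := ([] : List String) ++ gadget
  let d1 := ((PySem.Dict.get? replacement_dict label_text).getD (PySem.Dict.ofList [])).items.foldl
      (fun g kv => g.map (fun s => PySem.Str.replace s kv.1 kv.2)) delabeled_gadget
  let d2 := ((PySem.Dict.get? reverse_replacement_dict rev_label_text).getD (PySem.Dict.ofList [])).items.foldl
      (fun g kv => g.map (fun s => PySem.Str.replace s kv.1 kv.2)) d1
  PySem.Str.join "" d2

-- ===== PORT B =====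
-- B's per-line scan: at each position substitute the first table key that matches, else copy the char.
-- (Source B's `for k in keys … startswith … else` inner loop; keys are nonempty so the `- 1` drop equals
-- dropping the key length from the whole line.)
def scanR (m : List (List Char × List Char)) : List Char → List Char
  | [] => []
  | c :: t =>
    match m.find? (fun kv => kv.1.isPrefixOf (c :: t)) with
    | some kv => kv.2 ++ scanR m (t.drop (kv.1.length - 1))
    | none => c :: scanR m t
  termination_by cs => cs.length
  decreasing_by
    · simp only [List.length_cons, List.length_drop]; omega
    · simp

def get_delabeled_processed_func_alt (gadget : List String) (label_text : String) : String :=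
  let rev_label_text := if label_text == "good" then "bad" else "good"
  let mapping := ((PySem.Dict.get? reverse_replacement_dict rev_label_text).getD (PySem.Dict.ofList [])).items.foldl
      (fun d kv => PySem.Dict.insert d kv.1 kv.2)
      ((PySem.Dict.get? replacement_dict label_text).getD (PySem.Dict.ofList []))
  let mchars := mapping.items.map (fun kv => (kv.1.toList, kv.2.toList))
  let pieces := (([] : List String) ++ gadget).foldl (fun acc line => acc ++ scanR mchars line.toList) []
  String.ofList pieces

-- ===== PRECONDITION & SPEC =====
-- Pre_ excludes exactly the labels outside the two dict keys, on which A raises KeyError.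
def Pre_get_delabeled_processed_func (gadget : List String) (label_text : String) : Prop :=
  label_text = "good" ∨ label_text = "bad"
instance (gadget : List String) (label_text : String) : Decidable (Pre_get_delabeled_processed_func gadget label_text) := by
  unfold Pre_get_delabeled_processed_func; infer_instance

def pvWitness_get_delabeled_processed_func : List String × String := (["if (good) { bad(); }"], "good")

def Spec_get_delabeled_processed_func (gadget : List String) (label_text : String) (out : String) : Prop := out = get_delabeled_processed_func_alt gadget label_text
instance (gadget : List String) (label_text : String) (out : String) : Decidable (Spec_get_delabeled_processed_func gadget label_text out) := by unfold Spec_get_delabeled_processed_func; infer_instance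

-- ===== CLAIM (what is proved, stated in full; the proofs are below) =====
def Claim_equal_get_delabeled_processed_func : Prop := ∀ (gadget : List String) (label_text : String), Dom_get_delabeled_processed_func gadget label_text → Pre_get_delabeled_processed_func gadget label_text → Spec_get_delabeled_processed_func gadget label_text (get_delabeled_processed_func gadget label_text)

-- ===== LEMMAS AND PROOFS =====

-- `rep1` is a fuel-free restatement of one full replace pass (PySem.Chars.replace with a nonempty key).
def rep1 (k v : List Char) : List Char → List Char
  | [] => []
  | c :: t =>
    if k.isPrefixOf (c :: t) then v ++ rep1 k v (t.drop (k.length - 1))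
    else c :: rep1 k v t
  termination_by cs => cs.length
  decreasing_by
    · simp only [List.length_cons, List.length_drop]; omega
    · simp

theorem go_eq (old new : List Char) (h : old ≠ []) :
    ∀ fuel l acc, l.length ≤ fuel →
      PySem.Chars.replace.go old new fuel l acc = acc.reverse ++ rep1 old new l := by
  intro fuel
  induction fuel with
  | zero =>
    intro l acc hl
    have : l = [] := by cases l <;> simp_all
    subst this; simp [PySem.Chars.replace.go, rep1]
  | succ n ih =>
    intro l acc hl
    cases l with
    | nil => simp [PySem.Chars.replace.go, rep1]
    | cons c t =>
      rw [PySem.Chars.replace.go]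
      by_cases hp : old.isPrefixOf (c :: t)
      · rw [if_pos hp]
        obtain ⟨d, k', rfl⟩ : ∃ d k', old = d :: k' := by
          cases old with | nil => exact absurd rfl h | cons d k' => exact ⟨d, k', rfl⟩
        have hdrop : (c :: t).drop (d :: k').length = t.drop k'.length := by simp
        rw [hdrop, ih _ _ (by simp only [List.length_drop]; simp at hl; omega)]
        rw [rep1, if_pos hp]
        simp
      · rw [if_neg hp, ih _ _ (by simpa using Nat.le_of_succ_le_succ hl), rep1, if_neg hp]
        simp

theorem replace_eq_rep1 (s k v : List Char) (hk : k ≠ []) :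
    PySem.Chars.replace s k v = rep1 k v s := by
  rw [PySem.Chars.replace, if_neg (by simp [hk])]
  simpa using go_eq k v hk s.length s [] le_rfl

theorem rep1_match (c : Char) (k' v x : List Char) :
    rep1 (c :: k') v ((c :: k') ++ x) = v ++ rep1 (c :: k') v x := by
  rw [List.cons_append, rep1, if_pos (by simpa using List.prefix_append (c :: k') x)]
  simp

theorem rep1_nomatch (k v : List Char) (c : Char) (t : List Char)
    (h : ¬ k.isPrefixOf (c :: t)) : rep1 k v (c :: t) = c :: rep1 k v t := by
  rw [rep1, if_neg h]

theorem rep1_skip (d : Char) (k' v : List Char) (p x : List Char) (hd : d ∉ p) :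
    rep1 (d :: k') v (p ++ x) = p ++ rep1 (d :: k') v x := by
  induction p with
  | nil => simp
  | cons c q ih =>
    have hc : d ≠ c := fun h => hd (h ▸ List.mem_cons_self ..)
    rw [List.cons_append, rep1_nomatch _ _ _ _ (by simp [List.isPrefixOf, hc])]
    simp [ih (fun h => hd (List.mem_cons_of_mem _ h))]

-- a later key matches the output of an earlier pass exactly where it matched the input
theorem prefix_rep1_eq (d1 : Char) (r1 v : List Char) (hv0 : v ≠ []) :
    ∀ (s k2 : List Char), d1 ∉ k2 → (∀ a ∈ v, a ∉ k2) →
      k2.isPrefixOf (rep1 (d1 :: r1) v s) = k2.isPrefixOf s := by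
  intro s
  induction s with
  | nil => intro k2 _ _; simp [rep1]
  | cons c t ih =>
    intro k2 hd hv
    by_cases hm : (d1 :: r1).isPrefixOf (c :: t)
    · obtain ⟨x, hx⟩ : ∃ x, c :: t = (d1 :: r1) ++ x := by
        obtain ⟨x, hx⟩ := List.isPrefixOf_iff_prefix.mp hm
        exact ⟨x, hx.symm⟩
      rw [hx, rep1_match]
      cases k2 with
      | nil => simp [List.isPrefixOf]
      | cons e k2' =>
        obtain ⟨a, v', rfl⟩ : ∃ a v', v = a :: v' := by
          cases v with | nil => exact absurd rfl hv0 | cons a v' => exact ⟨a, v', rfl⟩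
        have hea : e ≠ a := fun h => hv a (by simp) (h ▸ List.mem_cons_self ..)
        have hed : e ≠ d1 := fun h => hd (h ▸ List.mem_cons_self ..)
        simp [List.isPrefixOf, beq_eq_false_iff_ne.mpr hea, beq_eq_false_iff_ne.mpr hed]
    · rw [rep1_nomatch _ _ _ _ hm]
      cases k2 with
      | nil => simp [List.isPrefixOf]
      | cons e k2' =>
        have : k2'.isPrefixOf (rep1 (d1 :: r1) v t) = k2'.isPrefixOf t :=
          ih k2' (fun h => hd (List.mem_cons_of_mem _ h))
            (fun a ha h => hv a ha (List.mem_cons_of_mem _ h))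
        simp [List.isPrefixOf, this]

-- four sequential passes with non-interfering keys/values equal one combined scan
theorem chain4 (d1 d2 d3 d4 : Char) (r1 r2 r3 r4 v1 v2 v3 v4 : List Char)
    (hv1 : v1 ≠ []) (hv2 : v2 ≠ []) (hv3 : v3 ≠ [])
    (h12 : d1 ∉ (d2 :: r2) ∧ (∀ a ∈ v1, a ∉ (d2 :: r2)) ∧ d2 ∉ v1)
    (h13 : d1 ∉ (d3 :: r3) ∧ (∀ a ∈ v1, a ∉ (d3 :: r3)) ∧ d3 ∉ v1)
    (h14 : d1 ∉ (d4 :: r4) ∧ (∀ a ∈ v1, a ∉ (d4 :: r4)) ∧ d4 ∉ v1)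
    (h23 : d2 ∉ (d3 :: r3) ∧ (∀ a ∈ v2, a ∉ (d3 :: r3)) ∧ d3 ∉ v2)
    (h24 : d2 ∉ (d4 :: r4) ∧ (∀ a ∈ v2, a ∉ (d4 :: r4)) ∧ d4 ∉ v2)
    (h34 : d3 ∉ (d4 :: r4) ∧ (∀ a ∈ v3, a ∉ (d4 :: r4)) ∧ d4 ∉ v3) :
    ∀ (n : Nat) (s : List Char), s.length ≤ n →
      rep1 (d4 :: r4) v4 (rep1 (d3 :: r3) v3 (rep1 (d2 :: r2) v2 (rep1 (d1 :: r1) v1 s)))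
        = scanR [(d1 :: r1, v1), (d2 :: r2, v2), (d3 :: r3, v3), (d4 :: r4, v4)] s := by
  intro n
  induction n with
  | zero =>
    intro s h
    have hs : s = [] := by cases s <;> simp_all
    subst hs; simp [rep1, scanR]
  | succ n ih =>
    intro s hs
    cases s with
    | nil => simp [rep1, scanR]
    | cons c t =>
      by_cases h1 : (d1 :: r1).isPrefixOf (c :: t)
      · obtain ⟨x, hx⟩ := List.isPrefixOf_iff_prefix.mp h1
        have hlen : x.length ≤ n := by
          have := congrArg List.length hx; simp at this; simp at hs; omega
        rw [← hx]
        rw [rep1_match d1 r1 v1 x,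
            rep1_skip d2 r2 v2 v1 _ h12.2.2,
            rep1_skip d3 r3 v3 v1 _ h13.2.2,
            rep1_skip d4 r4 v4 v1 _ h14.2.2,
            ih x hlen]
        rw [List.cons_append]
        have hpre : r1.isPrefixOf (r1 ++ x) = true := List.isPrefixOf_iff_prefix.mpr (List.prefix_append _ _)
        simp [scanR, List.find?, hpre]
      · by_cases h2 : (d2 :: r2).isPrefixOf (c :: t)
        · obtain ⟨x, hx⟩ := List.isPrefixOf_iff_prefix.mp h2
          have hlen : x.length ≤ n := by
            have := congrArg List.length hx; simp at this; simp at hs; omega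
          rw [← hx] at h1 ⊢
          rw [rep1_skip d1 r1 v1 (d2 :: r2) _ h12.1,
              rep1_match d2 r2 v2,
              rep1_skip d3 r3 v3 v2 _ h23.2.2,
              rep1_skip d4 r4 v4 v2 _ h24.2.2,
              ih x hlen]
          rw [List.cons_append] at h1 ⊢
          have hpre : r2.isPrefixOf (r2 ++ x) = true := List.isPrefixOf_iff_prefix.mpr (List.prefix_append _ _)
          simp [scanR, List.find?, h1, hpre]
        · by_cases h3 : (d3 :: r3).isPrefixOf (c :: t)
          · obtain ⟨x, hx⟩ := List.isPrefixOf_iff_prefix.mp h3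
            have hlen : x.length ≤ n := by
              have := congrArg List.length hx; simp at this; simp at hs; omega
            rw [← hx] at h1 h2 ⊢
            rw [rep1_skip d1 r1 v1 (d3 :: r3) _ h13.1,
                rep1_skip d2 r2 v2 (d3 :: r3) _ h23.1,
                rep1_match d3 r3 v3,
                rep1_skip d4 r4 v4 v3 _ h34.2.2,
                ih x hlen]
            rw [List.cons_append] at h1 h2 ⊢
            have hpre : r3.isPrefixOf (r3 ++ x) = true := List.isPrefixOf_iff_prefix.mpr (List.prefix_append _ _)
            simp [scanR, List.find?, h1, h2, hpre]
          · by_cases h4 : (d4 :: r4).isPrefixOf (c :: t)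
            · obtain ⟨x, hx⟩ := List.isPrefixOf_iff_prefix.mp h4
              have hlen : x.length ≤ n := by
                have := congrArg List.length hx; simp at this; simp at hs; omega
              rw [← hx] at h1 h2 h3 ⊢
              rw [rep1_skip d1 r1 v1 (d4 :: r4) _ h14.1,
                  rep1_skip d2 r2 v2 (d4 :: r4) _ h24.1,
                  rep1_skip d3 r3 v3 (d4 :: r4) _ h34.1,
                  rep1_match d4 r4 v4,
                  ih x hlen]
              rw [List.cons_append] at h1 h2 h3 ⊢
              have hpre : r4.isPrefixOf (r4 ++ x) = true := List.isPrefixOf_iff_prefix.mpr (List.prefix_append _ _)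
              simp [scanR, List.find?, h1, h2, h3, hpre]
            · have eP2 : (d2 :: r2).isPrefixOf (rep1 (d1 :: r1) v1 (c :: t)) = false := by
                rw [prefix_rep1_eq d1 r1 v1 hv1 (c :: t) _ h12.1 h12.2.1]
                exact Bool.eq_false_iff.mpr h2
              have eP3 : (d3 :: r3).isPrefixOf (rep1 (d2 :: r2) v2 (rep1 (d1 :: r1) v1 (c :: t))) = false := by
                rw [prefix_rep1_eq d2 r2 v2 hv2 _ _ h23.1 h23.2.1,
                    prefix_rep1_eq d1 r1 v1 hv1 _ _ h13.1 h13.2.1]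
                exact Bool.eq_false_iff.mpr h3
              have eP4 : (d4 :: r4).isPrefixOf (rep1 (d3 :: r3) v3 (rep1 (d2 :: r2) v2 (rep1 (d1 :: r1) v1 (c :: t)))) = false := by
                rw [prefix_rep1_eq d3 r3 v3 hv3 _ _ h34.1 h34.2.1,
                    prefix_rep1_eq d2 r2 v2 hv2 _ _ h24.1 h24.2.1,
                    prefix_rep1_eq d1 r1 v1 hv1 _ _ h14.1 h14.2.1]
                exact Bool.eq_false_iff.mpr h4
              rw [rep1_nomatch _ _ _ _ h1] at eP2 eP3 eP4 ⊢
              have h2' : ¬ ((d2 :: r2).isPrefixOf (c :: rep1 (d1 :: r1) v1 t) = true) := by simp [eP2]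
              rw [rep1_nomatch _ _ _ _ h2'] at eP3 eP4 ⊢
              have h3' : ¬ ((d3 :: r3).isPrefixOf (c :: rep1 (d2 :: r2) v2 (rep1 (d1 :: r1) v1 t)) = true) := by simp [eP3]
              rw [rep1_nomatch _ _ _ _ h3'] at eP4 ⊢
              have h4' : ¬ ((d4 :: r4).isPrefixOf (c :: rep1 (d3 :: r3) v3 (rep1 (d2 :: r2) v2 (rep1 (d1 :: r1) v1 t))) = true) := by simp [eP4]
              rw [rep1_nomatch _ _ _ _ h4']
              rw [ih t (by simp at hs; omega)]
              simp [scanR, List.find?, h1, h2, h3, h4]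

theorem joinNil : ∀ l : List (List Char), PySem.Chars.join [] l = l.flatten
  | [] => rfl
  | [x] => by simp [PySem.Chars.join, List.intercalate]
  | x :: y :: t => by
    have ih := joinNil (y :: t)
    rw [PySem.Chars.join, List.intercalate] at ih ⊢
    rw [show List.intersperse ([] : List Char) (x :: y :: t) = x :: [] :: List.intersperse [] (y :: t) from rfl]
    simp_all

-- per-line equality, label "good"
theorem line_good (s : String) :
    (PySem.Str.replace (PySem.Str.replace (PySem.Str.replace (PySem.Str.replace s "good" "unk") "Good" "Unk") "bad" "unk2") "Bad" "Unk2").toList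
      = scanR [(['g','o','o','d'], ['u','n','k']), (['G','o','o','d'], ['U','n','k']),
               (['b','a','d'], ['u','n','k','2']), (['B','a','d'], ['U','n','k','2'])] s.toList := by
  simp only [PySem.Str.toList_replace]
  rw [replace_eq_rep1 _ _ _ (by simp), replace_eq_rep1 _ _ _ (by simp),
      replace_eq_rep1 _ _ _ (by simp), replace_eq_rep1 _ _ _ (by simp)]
  exact chain4 'g' 'G' 'b' 'B' ['o','o','d'] ['o','o','d'] ['a','d'] ['a','d']
    ['u','n','k'] ['U','n','k'] ['u','n','k','2'] ['U','n','k','2']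
    (by simp) (by simp) (by simp)
    ⟨by simp, by intro a ha; fin_cases ha <;> simp, by simp⟩
    ⟨by simp, by intro a ha; fin_cases ha <;> simp, by simp⟩
    ⟨by simp, by intro a ha; fin_cases ha <;> simp, by simp⟩
    ⟨by simp, by intro a ha; fin_cases ha <;> simp, by simp⟩
    ⟨by simp, by intro a ha; fin_cases ha <;> simp, by simp⟩
    ⟨by simp, by intro a ha; fin_cases ha <;> simp, by simp⟩
    s.toList.length s.toList le_rfl

-- per-line equality, label "bad"
theorem line_bad (s : String) :
    (PySem.Str.replace (PySem.Str.replace (PySem.Str.replace (PySem.Str.replace s "bad" "unk") "Bad" "Unk") "good" "unk2") "Good" "Unk2").toList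
      = scanR [(['b','a','d'], ['u','n','k']), (['B','a','d'], ['U','n','k']),
               (['g','o','o','d'], ['u','n','k','2']), (['G','o','o','d'], ['U','n','k','2'])] s.toList := by
  simp only [PySem.Str.toList_replace]
  rw [replace_eq_rep1 _ _ _ (by simp), replace_eq_rep1 _ _ _ (by simp),
      replace_eq_rep1 _ _ _ (by simp), replace_eq_rep1 _ _ _ (by simp)]
  exact chain4 'b' 'B' 'g' 'G' ['a','d'] ['a','d'] ['o','o','d'] ['o','o','d']
    ['u','n','k'] ['U','n','k'] ['u','n','k','2'] ['U','n','k','2']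
    (by simp) (by simp) (by simp)
    ⟨by simp, by intro a ha; fin_cases ha <;> simp, by simp⟩
    ⟨by simp, by intro a ha; fin_cases ha <;> simp, by simp⟩
    ⟨by simp, by intro a ha; fin_cases ha <;> simp, by simp⟩
    ⟨by simp, by intro a ha; fin_cases ha <;> simp, by simp⟩
    ⟨by simp, by intro a ha; fin_cases ha <;> simp, by simp⟩
    ⟨by simp, by intro a ha; fin_cases ha <;> simp, by simp⟩
    s.toList.length s.toList le_rfl

theorem foldl_acc_scan (m : List (List Char × List Char)) :
    ∀ (gs : List String) (acc : List Char),
      gs.foldl (fun a line => a ++ scanR m line.toList) acc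
        = acc ++ (gs.map (fun line => scanR m line.toList)).flatten := by
  intro gs
  induction gs with
  | nil => intro acc; simp
  | cons x t ih => intro acc; simp [List.foldl_cons, ih]

-- ===== VERDICT (by name: the statement is the Claim_ definition above) =====
set_option maxHeartbeats 1000000 in
theorem get_delabeled_processed_func_spec : Claim_equal_get_delabeled_processed_func := by
  intro gadget label_text _ hpre
  unfold Spec_get_delabeled_processed_func
  unfold get_delabeled_processed_func get_delabeled_processed_func_alt
  rcases hpre with h | h <;> subst h
  · apply String.toList_inj.mp
    simp only []
    rw [show ((if ("good" : String) == "good" then ("bad" : String) else "good")) = "bad" from rfl]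
    rw [show ((PySem.Dict.get? replacement_dict "good").getD (PySem.Dict.ofList [])).items
          = [("good", "unk"), ("Good", "Unk")] from rfl]
    rw [show ((PySem.Dict.get? reverse_replacement_dict "bad").getD (PySem.Dict.ofList [])).items
          = [("bad", "unk2"), ("Bad", "Unk2")] from rfl]
    rw [show (([("bad", "unk2"), ("Bad", "Unk2")] : List (String × String)).foldl
            (fun d kv => PySem.Dict.insert d kv.1 kv.2)
            ((PySem.Dict.get? replacement_dict "good").getD (PySem.Dict.ofList []))).items.map
            (fun kv => (kv.1.toList, kv.2.toList))
          = [(['g','o','o','d'], ['u','n','k']), (['G','o','o','d'], ['U','n','k']),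
             (['b','a','d'], ['u','n','k','2']), (['B','a','d'], ['U','n','k','2'])] from rfl]
    rw [PySem.Str.toList_join, foldl_acc_scan]
    rw [show ("" : String).toList = [] from rfl, joinNil]
    simp only [List.nil_append, List.foldl_cons, List.foldl_nil, String.toList_ofList,
      List.map_map, List.nil_append]
    refine congrArg List.flatten (List.map_congr_left fun s _ => ?_)
    simpa using line_good s
  · apply String.toList_inj.mp
    simp only []
    rw [show ((if ("bad" : String) == "good" then ("bad" : String) else "good")) = "good" from rfl]
    rw [show ((PySem.Dict.get? replacement_dict "bad").getD (PySem.Dict.ofList [])).items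
          = [("bad", "unk"), ("Bad", "Unk")] from rfl]
    rw [show ((PySem.Dict.get? reverse_replacement_dict "good").getD (PySem.Dict.ofList [])).items
          = [("good", "unk2"), ("Good", "Unk2")] from rfl]
    rw [show (([("good", "unk2"), ("Good", "Unk2")] : List (String × String)).foldl
            (fun d kv => PySem.Dict.insert d kv.1 kv.2)
            ((PySem.Dict.get? replacement_dict "bad").getD (PySem.Dict.ofList []))).items.map
            (fun kv => (kv.1.toList, kv.2.toList))
          = [(['b','a','d'], ['u','n','k']), (['B','a','d'], ['U','n','k']),
             (['g','o','o','d'], ['u','n','k','2']), (['G','o','o','d'], ['U','n','k','2'])] from rfl]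
    rw [PySem.Str.toList_join, foldl_acc_scan]
    rw [show ("" : String).toList = [] from rfl, joinNil]
    simp only [List.nil_append, List.foldl_cons, List.foldl_nil, String.toList_ofList,
      List.map_map, List.nil_append]
    refine congrArg List.flatten (List.map_congr_left fun s _ => ?_)
    simpa using line_bad s
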